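-- pv_equiv track=rewrite | github.com/Ridhimagupta0603/SudokuSolver | SudokuSolver.py | get_block_num
-- ===== SOURCE A (Python) =====
-- from typing import Tuple, List
--
-- def get_block_num(sudoku:List[List[int]], pos:Tuple[int, int]) -> int:
-- 	"""This function takes a parameter position and returns
-- 	the block number of the block which contains the position.
-- 	"""
-- 	# your code goes here
-- 	l1=[[1,2,3],[4,5,6],[7,8,9]]
-- 	for n in range(3):
-- 		if pos[0] in range(3*n+1,3*n+4):
-- 			for k in range(3):
-- 				if pos[1] in range(3*k+1,3*k+4):
-- 					return(l1[n][k])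
--
-- 	return 0
-- ===== SOURCE B (Python) =====
-- def get_block_num(sudoku, pos):
--     r, c = pos
--     if r in range(1, 10) and c in range(1, 10):
--         return 3 * ((r - 1) // 3) + (c - 1) // 3 + 1
--     return 0
-- ===== Notes on version B (the rewrite author's own statement) =====
-- stated objective: simpler
-- what changed: Replaced the nested scanning loops over row/column bands with the l1 lookup table by a single range guard plus the closed-form 3*((r-1)//3) + (c-1)//3 + 1.
import Mathlib
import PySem

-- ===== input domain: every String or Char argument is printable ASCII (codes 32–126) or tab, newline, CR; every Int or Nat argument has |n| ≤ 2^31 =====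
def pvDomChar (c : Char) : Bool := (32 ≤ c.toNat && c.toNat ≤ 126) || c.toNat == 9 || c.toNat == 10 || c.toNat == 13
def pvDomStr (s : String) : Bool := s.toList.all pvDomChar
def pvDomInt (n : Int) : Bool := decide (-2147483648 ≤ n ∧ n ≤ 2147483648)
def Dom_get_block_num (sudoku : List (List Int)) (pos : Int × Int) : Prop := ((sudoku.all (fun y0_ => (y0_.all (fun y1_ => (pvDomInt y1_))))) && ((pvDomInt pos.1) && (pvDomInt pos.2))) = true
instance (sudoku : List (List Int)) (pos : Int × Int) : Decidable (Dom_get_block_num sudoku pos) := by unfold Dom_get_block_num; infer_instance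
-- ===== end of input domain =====

-- ===== PORT A =====
-- One-line: B replaces A's nested band-scanning loops and l1 table by a range guard plus a closed-form block formula (simpler).
def get_block_num (sudoku : List (List Int)) (pos : Int × Int) : Int :=
  let l1 : List (List Int) := [[1, 2, 3], [4, 5, 6], [7, 8, 9]]
  match (List.range 3).findSome? (fun (n : Nat) =>
    if 3 * (n : Int) + 1 ≤ pos.1 ∧ pos.1 < 3 * (n : Int) + 4 then
      (List.range 3).findSome? (fun (k : Nat) =>
        if 3 * (k : Int) + 1 ≤ pos.2 ∧ pos.2 < 3 * (k : Int) + 4 then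
          some ((l1.getD n []).getD k 0)
        else none)
    else none) with
  | some v => v
  | none => 0

-- ===== PORT B =====
def get_block_num_alt (sudoku : List (List Int)) (pos : Int × Int) : Int :=
  if 1 ≤ pos.1 ∧ pos.1 < 10 ∧ 1 ≤ pos.2 ∧ pos.2 < 10 then
    3 * PySem.Int.floordiv (pos.1 - 1) 3 + PySem.Int.floordiv (pos.2 - 1) 3 + 1
  else 0

-- ===== PRECONDITION & SPEC =====
def Spec_get_block_num (sudoku : List (List Int)) (pos : Int × Int) (out : Int) : Prop := out = get_block_num_alt sudoku pos
instance (sudoku : List (List Int)) (pos : Int × Int) (out : Int) : Decidable (Spec_get_block_num sudoku pos out) := by unfold Spec_get_block_num; infer_instance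

-- ===== CLAIM (what is proved, stated in full; the proofs are below) =====
def Claim_equal_get_block_num : Prop := ∀ (sudoku : List (List Int)) (pos : Int × Int), Dom_get_block_num sudoku pos → Spec_get_block_num sudoku pos (get_block_num sudoku pos)

-- ===== LEMMAS AND PROOFS =====

-- ===== VERDICT (by name: the statement is the Claim_ definition above) =====
theorem get_block_num_spec : Claim_equal_get_block_num := by
  intro sudoku pos _
  unfold Spec_get_block_num get_block_num get_block_num_alt
  obtain ⟨r, c⟩ := pos
  by_cases hin : 1 ≤ r ∧ r < 10 ∧ 1 ≤ c ∧ c < 10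
  · obtain ⟨h1, h2, h3, h4⟩ := hin
    interval_cases r <;> interval_cases c <;> decide
  · rw [if_neg hin]
    have hnone : (List.range 3).findSome? (fun (n : Nat) =>
        if 3 * (n : Int) + 1 ≤ r ∧ r < 3 * (n : Int) + 4 then
          (List.range 3).findSome? (fun (k : Nat) =>
            if 3 * (k : Int) + 1 ≤ c ∧ c < 3 * (k : Int) + 4 then
              some (([[1, 2, 3], [4, 5, 6], [7, 8, 9]] : List (List Int)).getD n [] |>.getD k 0)
            else none)
        else none) = none := by
      rw [List.findSome?_eq_none_iff]
      intro n hn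
      have hn3 : n < 3 := List.mem_range.mp hn
      by_cases hr : 3 * (n : Int) + 1 ≤ r ∧ r < 3 * (n : Int) + 4
      · rw [if_pos hr, List.findSome?_eq_none_iff]
        intro k hk
        have hk3 : k < 3 := List.mem_range.mp hk
        rw [if_neg]
        omega
      · rw [if_neg hr]
    simp only [hnone]
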